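-- pv_equiv track=rewrite | github.com/Ansonator/learning-python | LCM.py | increment_to_largest
-- ===== SOURCE A (Python) =====
-- def find_index_of_largest(numbers):
--     largest_index = 0
--     largest = numbers[largest_index]
--     for i in range(1,len(numbers)):
--         if (numbers[i] > largest):
--             largest = numbers[i]
--             largest_index = i
--     return (largest_index)
--
-- def increment_to_largest(current, original):
--     largest_index = find_index_of_largest(current)
--     largest_number = current[largest_index]
--     for i in range(0, len(current)):
--         if (i != largest_index):
--             while (current[i] < largest_number):
--                 current[i] += original[i]
--     return (current)
-- ===== SOURCE B (Python) =====
-- def increment_to_largest(current, original):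
--     m = max(current)
--     for i, (c, o) in enumerate(zip(current, original)):
--         if c < m:
--             current[i] = c + (m - c + o - 1) // o * o
--     return current
-- ===== Notes on version B (the rewrite author's own statement) =====
-- stated objective: faster
-- what changed: B replaces A's per-element while-loop of repeated additions (and the separate largest-index scan) by a single pass over enumerate(zip(current, original)) that jumps each element straight to its final value with one ceiling division; intended as faster (A timed out at n=16 in the probe where B returned, so no ratio could be measured).
import Mathlib
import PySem

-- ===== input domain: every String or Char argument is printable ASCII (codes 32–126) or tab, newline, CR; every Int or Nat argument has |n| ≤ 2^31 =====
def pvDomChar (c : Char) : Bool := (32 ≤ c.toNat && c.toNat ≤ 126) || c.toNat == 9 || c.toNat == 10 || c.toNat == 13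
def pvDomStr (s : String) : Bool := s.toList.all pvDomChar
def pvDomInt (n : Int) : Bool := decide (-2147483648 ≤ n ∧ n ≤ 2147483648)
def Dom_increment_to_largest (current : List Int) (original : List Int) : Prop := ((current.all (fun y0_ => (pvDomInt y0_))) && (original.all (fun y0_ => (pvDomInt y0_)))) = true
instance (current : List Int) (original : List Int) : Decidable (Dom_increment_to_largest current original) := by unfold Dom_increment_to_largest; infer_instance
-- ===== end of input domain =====

-- B replaces A's per-element repeated-addition while-loop by one ceiling division per element
-- (intended as faster; a timing run could not measure a ratio because A times out on the
-- generated sizes). Both A and B mutate `current` in place in Python and return it; the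
-- equivalence proved here is about the return value.

-- ===== PORT A =====
def find_index_of_largest (numbers : List Int) : Int :=
  -- largest_index = 0; largest = numbers[0]; for i in range(1, len(numbers)): …
  (((PySem.List.pyRange 1 (PySem.List.len numbers) 1).foldl
    (fun (s : Int × Int) i =>
      if PySem.List.pyGetD numbers i 0 > s.2 then (i, PySem.List.pyGetD numbers i 0) else s)
    (0, PySem.List.pyGetD numbers 0 0))).1

-- the `while current[i] < largest: current[i] += original[i]` loop, as a function of the
-- current cell value; the `0 < o` guard only makes it total (Python diverges for o ≤ 0, outside Pre_)
def whileAdd (c L o : Int) : Int :=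
  if _h : 0 < o ∧ c < L then whileAdd (c + o) L o else c
termination_by (L - c).toNat
decreasing_by omega

def increment_to_largest (current : List Int) (original : List Int) : List Int :=
  let li := find_index_of_largest current
  let L := PySem.List.pyGetD current li 0
  (PySem.List.pyRange 0 (PySem.List.len current) 1).foldl
    (fun cur i =>
      if i ≠ li then
        PySem.List.pySetD cur i (whileAdd (PySem.List.pyGetD cur i 0) L (PySem.List.pyGetD original i 0))
      else cur)
    current

-- ===== PORT B =====
-- m = max(current); for i, (c, o) in enumerate(zip(current, original)):
--   if c < m: current[i] = c + (m - c + o - 1) // o * o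
def increment_to_largest_alt (current : List Int) (original : List Int) : List Int :=
  let m := (PySem.List.max? current (fun y => y)).getD 0
  ((current.zip original).zipIdx).foldl
    (fun cur p =>
      if p.1.1 < m then
        PySem.List.pySetD cur (p.2 : Int)
          (p.1.1 + PySem.Int.floordiv (m - p.1.1 + p.1.2 - 1) p.1.2 * p.1.2)
      else cur)
    current

-- ===== PRECONDITION & SPEC =====
-- Pre_ excludes only inputs where A does not return: current = [] (IndexError in
-- find_index_of_largest), an index i with current[i] below the maximum but i ≥ len(original)
-- (IndexError), or such an i with original[i] ≤ 0 (the while loop never terminates).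
def Pre_increment_to_largest (current : List Int) (original : List Int) : Prop :=
  current ≠ [] ∧ ∀ i : Nat, i < current.length →
    (∃ y ∈ current, current.getD i 0 < y) →
    i < original.length ∧ 0 < original.getD i 0
instance (current : List Int) (original : List Int) : Decidable (Pre_increment_to_largest current original) := by unfold Pre_increment_to_largest; infer_instance
def pvWitness_increment_to_largest : List Int × List Int := ([2, 5, 3], [3, 1, 4])

def Spec_increment_to_largest (current : List Int) (original : List Int) (out : List Int) : Prop := out = increment_to_largest_alt current original
instance (current : List Int) (original : List Int) (out : List Int) : Decidable (Spec_increment_to_largest current original out) := by unfold Spec_increment_to_largest; infer_instance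

-- ===== CLAIM (what is proved, stated in full; the proofs are below) =====
def Claim_equal_increment_to_largest : Prop := ∀ (current : List Int) (original : List Int), Dom_increment_to_largest current original → Pre_increment_to_largest current original → Spec_increment_to_largest current original (increment_to_largest current original)

-- ===== LEMMAS AND PROOFS =====

lemma whileAdd_of_stop (c L o : Int) (h : ¬ (0 < o ∧ c < L)) : whileAdd c L o = c := by
  rw [whileAdd, dif_neg h]

lemma whileAdd_eq_ceil (L o : Int) (ho : 0 < o) :
    ∀ (n : Nat) (c : Int), (L - c).toNat ≤ n → c < L →
      whileAdd c L o = c + PySem.Int.floordiv (L - c + o - 1) o * o := by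
  intro n
  induction n with
  | zero => intro c hc h; omega
  | succ n ih =>
    intro c hc h
    rw [whileAdd, dif_pos ⟨ho, h⟩]
    by_cases h2 : c + o < L
    · rw [ih (c + o) (by omega) h2]
      have hdiv : PySem.Int.floordiv (L - c + o - 1) o
          = PySem.Int.floordiv (L - (c + o) + o - 1) o + 1 := by
        rw [PySem.Int.floordiv_eq_ediv_of_pos ho, PySem.Int.floordiv_eq_ediv_of_pos ho]
        have e : L - c + o - 1 = (L - (c + o) + o - 1) + 1 * o := by ring
        rw [e, Int.add_mul_ediv_right _ _ (by omega : o ≠ 0)]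
      rw [hdiv]; ring
    · rw [whileAdd_of_stop _ _ _ (by omega)]
      have hdiv : PySem.Int.floordiv (L - c + o - 1) o = 1 := by
        rw [PySem.Int.floordiv_eq_iff_of_pos ho]
        constructor <;> nlinarith
      rw [hdiv]; ring

-- invariant of find_index_of_largest's fold: the state stays a valid (index, value) pair,
-- its value never decreases and ends above every scanned element
lemma fio_fold_inv (nums : List Int) :
    ∀ (idxs : List Int), (∀ i ∈ idxs, 0 ≤ i ∧ i < (nums.length : Int)) →
    ∀ (s : Int × Int), 0 ≤ s.1 → s.1 < (nums.length : Int) → PySem.List.pyGetD nums s.1 0 = s.2 →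
      let r := idxs.foldl
        (fun (s : Int × Int) i =>
          if PySem.List.pyGetD nums i 0 > s.2 then (i, PySem.List.pyGetD nums i 0) else s) s
      (0 ≤ r.1 ∧ r.1 < (nums.length : Int) ∧ PySem.List.pyGetD nums r.1 0 = r.2) ∧
        s.2 ≤ r.2 ∧ ∀ i ∈ idxs, PySem.List.pyGetD nums i 0 ≤ r.2 := by
  intro idxs
  induction idxs with
  | nil => intro _ s h1 h2 h3; exact ⟨⟨h1, h2, h3⟩, le_refl _, by simp⟩
  | cons i t ih =>
    intro hmem s h1 h2 h3
    simp only [List.foldl_cons]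
    by_cases hc : PySem.List.pyGetD nums i 0 > s.2
    · have hi := hmem i (by simp)
      have := ih (fun j hj => hmem j (by simp [hj])) (i, PySem.List.pyGetD nums i 0)
        hi.1 hi.2 rfl
      rw [if_pos hc]
      refine ⟨this.1, le_trans (le_of_lt hc) this.2.1, ?_⟩
      intro j hj
      rcases List.mem_cons.mp hj with rfl | hj
      · exact this.2.1
      · exact this.2.2 j hj
    · have := ih (fun j hj => hmem j (by simp [hj])) s h1 h2 h3
      rw [if_neg hc]
      refine ⟨this.1, this.2.1, ?_⟩
      intro j hj
      rcases List.mem_cons.mp hj with rfl | hj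
      · exact le_trans (le_of_not_gt hc) this.2.1
      · exact this.2.2 j hj

-- A's `largest_number` is exactly B's `max(current)`
lemma L_eq_max (x : Int) (t : List Int) :
    PySem.List.pyGetD (x :: t) (find_index_of_largest (x :: t)) 0
      = (PySem.List.max? (x :: t) (fun y => y)).getD 0 ∧
    0 ≤ find_index_of_largest (x :: t) := by
  have hmem : ∀ i ∈ PySem.List.pyRange 1 (PySem.List.len (x :: t)) 1,
      0 ≤ i ∧ i < ((x :: t).length : Int) := by
    intro i hi
    rw [PySem.List.len_eq] at hi
    have := (PySem.List.mem_pyRange_one).mp hi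
    exact ⟨by omega, by omega⟩
  have hinv := fio_fold_inv (x :: t) _ hmem (0, x) (by omega)
    (by simp) (by rw [PySem.List.pyGetD_zero_cons])
  rw [PySem.List.max?_id_cons]
  unfold find_index_of_largest
  rw [PySem.List.pyGetD_zero_cons]
  obtain ⟨⟨hr0, hr1, hr2⟩, hxle, hall⟩ := hinv
  set r := (PySem.List.pyRange 1 (PySem.List.len (x :: t)) 1).foldl
      (fun (s : Int × Int) i =>
        if PySem.List.pyGetD (x :: t) i 0 > s.2 then (i, PySem.List.pyGetD (x :: t) i 0) else s)
      (0, x) with hr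
  refine ⟨?_, hr0⟩
  rw [hr2]
  simp only [Option.getD_some]
  -- r.2 = List.foldl max x t by antisymmetry
  have hmemr : r.2 ∈ x :: t := by
    rw [← hr2]
    exact PySem.List.pyGetD_mem _ _ (by unfold PySem.Raise.InRange; omega)
  have h1 : r.2 ≤ List.foldl max x t := by
    rcases List.mem_cons.mp hmemr with h | h
    · rw [h]; exact (PySem.List.le_foldl_max t x).1
    · exact (PySem.List.le_foldl_max t x).2 _ h
  have h2 : List.foldl max x t ≤ r.2 := by
    rcases PySem.List.foldl_max_mem t x with h | h
    · rw [h]; exact hxle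
    · obtain ⟨j, hj, hje⟩ := List.mem_iff_getElem.mp h
      have hidx : ((j : Int) + 1) ∈ PySem.List.pyRange 1 (PySem.List.len (x :: t)) 1 := by
        rw [PySem.List.len_eq, PySem.List.mem_pyRange_one]
        constructor <;> [omega; (simp only [List.length_cons]; push_cast; omega)]
      have := hall _ hidx
      have hg : PySem.List.pyGetD (x :: t) ((j : Int) + 1) 0 = t[j] := by
        have : ((j : Int) + 1) = (((j + 1 : Nat)) : Int) := by push_cast; ring
        rw [this, PySem.List.pyGetD_natCast]
        simp [List.getD, hj]
      rw [hg, hje] at this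
      exact this
  omega

-- the per-index value both loops install (under Pre_)
-- characterisation of A's loop: a left-to-right sweep of in-place updates
lemma foldA_inv (current original : List Int) (li L : Int) :
    ∀ (k a : Nat) (cur : List Int), a + k = current.length →
      cur.length = current.length →
      (∀ j : Nat, a ≤ j → j < current.length → cur.getD j 0 = current.getD j 0) →
      (let res := (List.range' a k).foldl
          (fun (cur : List Int) (i : Nat) =>
            if (i : Int) ≠ li then
              cur.set i (whileAdd (cur.getD i 0) L (original.getD i 0))
            else cur) cur
       res.length = current.length ∧
       ∀ j : Nat, j < current.length → res.getD j 0 =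
         if a ≤ j ∧ (j : Int) ≠ li then whileAdd (current.getD j 0) L (original.getD j 0)
         else cur.getD j 0) := by
  intro k
  induction k with
  | zero =>
    intro a cur ha hlen hsame
    refine ⟨by simpa using hlen, ?_⟩
    intro j hj
    rw [if_neg (by omega)]
    simp [List.range']
  | succ k ih =>
    intro a cur ha hlen hsame
    have halt : a < current.length := by omega
    simp only [List.range'_succ, List.foldl_cons]
    by_cases hli : (a : Int) ≠ li
    · rw [if_pos hli]
      set v := whileAdd (cur.getD a 0) L (original.getD a 0) with hv
      have hlen' : (cur.set a v).length = current.length := by simpa using hlen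
      have hsame' : ∀ j : Nat, a + 1 ≤ j → j < current.length →
          (cur.set a v).getD j 0 = current.getD j 0 := by
        intro j hj1 hj2
        rw [List.getD_eq_getElem?_getD, List.getElem?_set_ne (by omega),
          ← List.getD_eq_getElem?_getD]
        exact hsame j (by omega) hj2
      obtain ⟨hl, hres⟩ := ih (a + 1) (cur.set a v) (by omega) hlen' hsame'
      refine ⟨hl, ?_⟩
      intro j hj
      rw [hres j hj]
      by_cases hc1 : a + 1 ≤ j
      · by_cases hc2 : (j : Int) ≠ li
        · rw [if_pos ⟨hc1, hc2⟩, if_pos ⟨by omega, hc2⟩]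
        · rw [if_neg (by tauto), if_neg (by tauto)]
          rw [List.getD_eq_getElem?_getD, List.getElem?_set_ne (by omega),
            ← List.getD_eq_getElem?_getD]
      · have hje : j = a ∨ j < a := by omega
        rcases hje with rfl | hlt
        · rw [if_neg (by omega), if_pos ⟨le_refl _, hli⟩]
          rw [List.getD_eq_getElem?_getD, List.getElem?_set_self (by omega)]
          simp only [Option.getD_some]
          rw [hv, hsame j (le_refl _) hj]
        · rw [if_neg (by omega), if_neg (by omega)]
          rw [List.getD_eq_getElem?_getD, List.getElem?_set_ne (by omega),
            ← List.getD_eq_getElem?_getD]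
    · rw [if_neg hli]
      obtain ⟨hl, hres⟩ := ih (a + 1) cur (by omega) hlen
        (fun j hj1 hj2 => hsame j (by omega) hj2)
      refine ⟨hl, ?_⟩
      intro j hj
      rw [hres j hj]
      by_cases hc1 : a + 1 ≤ j
      · by_cases hc2 : (j : Int) ≠ li
        · rw [if_pos ⟨hc1, hc2⟩, if_pos ⟨by omega, hc2⟩]
        · rw [if_neg (by tauto), if_neg (by tauto)]
      · have hje : j = a ∨ j < a := by omega
        rcases hje with rfl | hlt
        · rw [if_neg (by omega), if_neg (by tauto)]
        · rw [if_neg (by omega), if_neg (by omega)]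

-- characterisation of B's loop over enumerate(zip(current, original))
lemma foldB_inv (current original : List Int) (m : Int) :
    ∀ (k a : Nat) (cur : List Int),
      a + k = min current.length original.length →
      cur.length = current.length →
      (∀ j : Nat, a ≤ j → j < current.length → cur.getD j 0 = current.getD j 0) →
      (let res := (((current.drop a).zip (original.drop a)).zipIdx a).foldl
          (fun (cur : List Int) (p : (Int × Int) × Nat) =>
            if p.1.1 < m then
              cur.set p.2 (p.1.1 + PySem.Int.floordiv (m - p.1.1 + p.1.2 - 1) p.1.2 * p.1.2)
            else cur) cur
       res.length = current.length ∧
       ∀ j : Nat, j < current.length → res.getD j 0 =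
         if a ≤ j ∧ j < original.length ∧ current.getD j 0 < m then
           current.getD j 0 + PySem.Int.floordiv (m - current.getD j 0 + original.getD j 0 - 1)
             (original.getD j 0) * (original.getD j 0)
         else cur.getD j 0) := by
  intro k
  induction k with
  | zero =>
    intro a cur ha hlen hsame
    have hz : ((current.drop a).zip (original.drop a)) = [] := by
      apply List.eq_nil_of_length_eq_zero
      rw [List.length_zip, List.length_drop, List.length_drop]
      omega
    rw [hz]
    refine ⟨hlen, ?_⟩
    intro j hj
    rw [if_neg (by omega)]
    rfl
  | succ k ih =>
    intro a cur ha hlen hsame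
    have hac : a < current.length := by omega
    have hao : a < original.length := by omega
    have hdc : current.drop a = current[a] :: current.drop (a + 1) :=
      (List.getElem_cons_drop hac).symm
    have hdo : original.drop a = original[a] :: original.drop (a + 1) :=
      (List.getElem_cons_drop hao).symm
    rw [hdc, hdo, List.zip_cons_cons, List.zipIdx_cons, List.foldl_cons]
    have hca : current.getD a 0 = current[a] := List.getD_eq_getElem _ _ hac
    have hoa : original.getD a 0 = original[a] := List.getD_eq_getElem _ _ hao
    by_cases hc : current[a] < m
    · rw [if_pos hc]
      set v := current[a] + PySem.Int.floordiv (m - current[a] + original[a] - 1)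
        original[a] * original[a] with hv
      have hlen' : (cur.set a v).length = current.length := by simpa using hlen
      have hsame' : ∀ j : Nat, a + 1 ≤ j → j < current.length →
          (cur.set a v).getD j 0 = current.getD j 0 := by
        intro j hj1 hj2
        rw [List.getD_eq_getElem?_getD, List.getElem?_set_ne (by omega),
          ← List.getD_eq_getElem?_getD]
        exact hsame j (by omega) hj2
      obtain ⟨hl, hres⟩ := ih (a + 1) (cur.set a v) (by omega) hlen' hsame'
      refine ⟨hl, ?_⟩
      intro j hj
      rw [hres j hj]
      by_cases hc1 : a + 1 ≤ j
      · by_cases hc2 : j < original.length ∧ current.getD j 0 < m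
        · rw [if_pos ⟨hc1, hc2⟩, if_pos ⟨by omega, hc2⟩]
        · rw [if_neg (by tauto), if_neg (by tauto)]
          rw [List.getD_eq_getElem?_getD, List.getElem?_set_ne (by omega),
            ← List.getD_eq_getElem?_getD]
      · have hje : j = a ∨ j < a := by omega
        rcases hje with rfl | hlt
        · rw [if_neg (by omega), if_pos ⟨le_refl _, hao, by rw [hca]; exact hc⟩]
          rw [List.getD_eq_getElem?_getD, List.getElem?_set_self (by omega)]
          simp only [Option.getD_some]
          rw [hv, hca, hoa]
        · rw [if_neg (by omega), if_neg (by omega)]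
          rw [List.getD_eq_getElem?_getD, List.getElem?_set_ne (by omega),
            ← List.getD_eq_getElem?_getD]
    · rw [if_neg hc]
      obtain ⟨hl, hres⟩ := ih (a + 1) cur (by omega) hlen
        (fun j hj1 hj2 => hsame j (by omega) hj2)
      refine ⟨hl, ?_⟩
      intro j hj
      rw [hres j hj]
      by_cases hc1 : a + 1 ≤ j
      · by_cases hc2 : j < original.length ∧ current.getD j 0 < m
        · rw [if_pos ⟨hc1, hc2⟩, if_pos ⟨by omega, hc2⟩]
        · rw [if_neg (by tauto), if_neg (by tauto)]
      · have hje : j = a ∨ j < a := by omega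
        rcases hje with rfl | hlt
        · rw [if_neg (by omega), if_neg (by rw [hca]; tauto)]
        · rw [if_neg (by omega), if_neg (by omega)]

-- ===== VERDICT (by name: the statement is the Claim_ definition above) =====
theorem increment_to_largest_spec : Claim_equal_increment_to_largest := by
  unfold Claim_equal_increment_to_largest Spec_increment_to_largest
  intro current original _hdom hpre
  obtain ⟨hne, hcond⟩ := hpre
  obtain ⟨x, t, rfl⟩ : ∃ x t, current = x :: t := by
    cases current with
    | nil => exact absurd rfl hne
    | cons x t => exact ⟨x, t, rfl⟩
  set current := x :: t with hcur
  obtain ⟨hLM, hli0⟩ := L_eq_max x t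
  set li := find_index_of_largest current with hlidef
  set M := (PySem.List.max? current (fun y => y)).getD 0 with hM
  have hMmem : M ∈ current := by
    apply PySem.List.max?_mem (key := fun y => y)
    rw [PySem.List.max?_id_cons, hM, PySem.List.max?_id_cons, Option.getD_some]
  rw [← hcur] at hLM
  -- rewrite A into the range' fold
  have hA0 : increment_to_largest current original
      = (PySem.List.pyRange 0 (PySem.List.len current) 1).foldl
          (fun cur i =>
            if i ≠ li then
              PySem.List.pySetD cur i
                (whileAdd (PySem.List.pyGetD cur i 0) (PySem.List.pyGetD current li 0)
                  (PySem.List.pyGetD original i 0))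
            else cur) current := rfl
  have hA : increment_to_largest current original
      = (List.range' 0 current.length).foldl
          (fun (cur : List Int) (i : Nat) =>
            if (i : Int) ≠ li then
              cur.set i (whileAdd (cur.getD i 0) M (original.getD i 0))
            else cur) current := by
    rw [hA0, hLM, PySem.List.len_eq, PySem.List.pyRange_one, List.foldl_map]
    rw [show ((current.length : Int) - 0).toNat = current.length by omega,
      List.range_eq_range']
    apply PySem.List.foldl_congr_mem
    intro acc i _hi
    have h0 : (0 : Int) + (i : Int) = (i : Int) := by ring
    rw [h0]
    by_cases hil : (i : Int) ≠ li
    · rw [if_pos hil, if_pos hil, PySem.List.pyGetD_natCast, PySem.List.pyGetD_natCast,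
        PySem.List.pySetD_natCast]
    · rw [if_neg hil, if_neg hil]
  -- rewrite B into the zipIdx fold
  have hB0 : increment_to_largest_alt current original
      = ((current.zip original).zipIdx).foldl
          (fun cur p =>
            if p.1.1 < M then
              PySem.List.pySetD cur (p.2 : Int)
                (p.1.1 + PySem.Int.floordiv (M - p.1.1 + p.1.2 - 1) p.1.2 * p.1.2)
            else cur) current := rfl
  have hB : increment_to_largest_alt current original
      = ((current.zip original).zipIdx).foldl
          (fun (cur : List Int) (p : (Int × Int) × Nat) =>
            if p.1.1 < M then
              cur.set p.2 (p.1.1 + PySem.Int.floordiv (M - p.1.1 + p.1.2 - 1) p.1.2 * p.1.2)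
            else cur) current := by
    rw [hB0]
    apply PySem.List.foldl_congr_mem
    intro acc p _hp
    by_cases hc : p.1.1 < M
    · rw [if_pos hc, if_pos hc, PySem.List.pySetD_natCast]
    · rw [if_neg hc, if_neg hc]
  obtain ⟨hAl, hAres⟩ := foldA_inv current original li M current.length 0 current
    (by omega) rfl (fun _ _ _ => rfl)
  obtain ⟨hBl, hBres⟩ := foldB_inv current original M (min current.length original.length) 0
    current (by omega) rfl (fun _ _ _ => rfl)
  rw [List.drop_zero, List.drop_zero] at hBres hBl
  rw [hA, hB]
  apply List.ext_getElem (by omega)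
  intro j hj1 hj2
  have hj : j < current.length := by omega
  have hgA : ((List.range' 0 current.length).foldl _ current).getD j 0 = _ := hAres j hj
  have hgB := hBres j hj
  rw [List.getD_eq_getElem _ _ hj1] at hgA
  rw [List.getD_eq_getElem _ _ hj2] at hgB
  rw [hgA, hgB]
  -- pointwise comparison
  by_cases hc : current.getD j 0 < M
  · obtain ⟨hjo, hopos⟩ := hcond j hj ⟨M, hMmem, hc⟩
    have hjli : (j : Int) ≠ li := by
      intro he
      rw [← he, PySem.List.pyGetD_natCast] at hLM
      omega
    rw [if_pos ⟨by omega, hjli⟩, if_pos ⟨by omega, hjo, hc⟩]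
    exact whileAdd_eq_ceil M (original.getD j 0) hopos (M - current.getD j 0).toNat
      (current.getD j 0) (le_refl _) hc
  · have hwa : whileAdd (current.getD j 0) M (original.getD j 0) = current.getD j 0 :=
      whileAdd_of_stop _ _ _ (by tauto)
    by_cases hjli : (j : Int) ≠ li
    · rw [if_pos ⟨by omega, hjli⟩, hwa, if_neg (fun hcon => hc hcon.2.2)]
    · rw [if_neg (by tauto), if_neg (fun hcon => hc hcon.2.2)]
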